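-- pv_equiv track=rewrite | github.com/Pothula-Kalyani-ML/pothula-dot-kalyani | trainingPrograms/module3_programs/prg1_expensive_pair.py | expensive_pair
-- ===== SOURCE A (Python) =====
-- def expensive_pair(keybord_prices, usb_prices, budget_amount):
--     keybord_prices.sort(reverse=True)
--     usb_prices.sort(reverse=True)
--     for keybord_price in keybord_prices:
--         for usb_price in usb_prices:
--             if budget_amount >= keybord_price+usb_price:
--                 most_expensive_pair_in_budget = [keybord_price, usb_price]
--                 return most_expensive_pair_in_budget
-- ===== SOURCE B (Python) =====
-- def expensive_pair(keybord_prices, usb_prices, budget_amount):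
--     # O(n+m): no sorting; pick the priciest keyboard that fits with the
--     # cheapest usb, then the priciest usb that fits beside that keyboard.
--     # (Unlike A, does not mutate the input lists; return value identical.)
--     if not usb_prices:
--         return None
--     u_min = min(usb_prices)
--     best_kb = None
--     for k in keybord_prices:
--         if k + u_min <= budget_amount and (best_kb is None or k > best_kb):
--             best_kb = k
--     if best_kb is None:
--         return None
--     remaining = budget_amount - best_kb
--     best_usb = max(u for u in usb_prices if u <= remaining)
--     return [best_kb, best_usb]
-- ===== Notes on version B (the rewrite author's own statement) =====
-- stated objective: faster
-- what changed: B replaces A's double in-place sort plus nested scan with two linear passes: it takes the cheapest usb, scans once for the priciest keyboard that fits with it, then scans once for the priciest usb that fits beside that keyboard (B also does not mutate the input lists).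
import Mathlib
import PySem

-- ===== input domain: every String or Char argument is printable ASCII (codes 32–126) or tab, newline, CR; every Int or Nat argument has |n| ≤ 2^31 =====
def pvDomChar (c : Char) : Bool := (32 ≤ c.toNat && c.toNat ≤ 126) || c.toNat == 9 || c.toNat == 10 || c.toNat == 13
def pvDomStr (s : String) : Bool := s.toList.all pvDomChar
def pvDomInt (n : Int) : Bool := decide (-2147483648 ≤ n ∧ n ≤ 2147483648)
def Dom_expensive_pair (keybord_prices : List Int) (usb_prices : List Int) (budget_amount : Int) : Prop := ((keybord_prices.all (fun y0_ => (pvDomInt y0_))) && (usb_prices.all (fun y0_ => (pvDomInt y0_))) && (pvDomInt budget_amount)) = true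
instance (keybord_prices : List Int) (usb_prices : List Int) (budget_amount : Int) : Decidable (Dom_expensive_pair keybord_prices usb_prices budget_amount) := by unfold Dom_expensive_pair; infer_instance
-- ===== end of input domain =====

-- B avoids A's double sort and nested scan: two linear passes (O(n+m) vs A's O(n·m + sorting)).
-- A sorts both input lists in place; the equivalence proved here is about the RETURN value only (B does not mutate).

-- ===== PORT A =====
-- inner 'for usb_price in usb_prices' loop
def epInner (budget kb : Int) : List Int → Option (List Int)
  | [] => none
  | u :: rest => if budget ≥ kb + u then some [kb, u] else epInner budget kb rest

-- outer 'for keybord_price in keybord_prices' loop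
def epOuter (budget : Int) (usbS : List Int) : List Int → Option (List Int)
  | [] => none
  | k :: rest =>
    match epInner budget k usbS with
    | some r => some r
    | none => epOuter budget usbS rest

def expensive_pair (keybord_prices : List Int) (usb_prices : List Int) (budget_amount : Int) : Option (List Int) :=
  epOuter budget_amount
    (PySem.List.sorted usb_prices (fun x => x) true)
    (PySem.List.sorted keybord_prices (fun x => x) true)

-- ===== PORT B =====
-- running maximum over keyboards that fit with the cheapest usb
-- 'best_kb is None or k > best_kb'
def noneOrLt (acc : Option Int) (k : Int) : Bool :=
  match acc with
  | none => true
  | some m => decide (m < k)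

def bestKbLoop (budget umin : Int) : List Int → Option Int → Option Int
  | [], acc => acc
  | k :: rest, acc =>
    bestKbLoop budget umin rest
      (if decide (k + umin ≤ budget) && noneOrLt acc k then some k else acc)

def expensive_pair_alt (keybord_prices : List Int) (usb_prices : List Int) (budget_amount : Int) : Option (List Int) :=
  match PySem.List.min? usb_prices (fun x => x) with
  | none => none
  | some umin =>
    match bestKbLoop budget_amount umin keybord_prices none with
    | none => none
    | some bk =>
      match PySem.List.max? (usb_prices.filter (fun u => decide (u ≤ budget_amount - bk))) (fun x => x) with
      | none => none   -- unreachable: umin itself passes the filter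
      | some bu => some [bk, bu]

-- ===== PRECONDITION & SPEC =====
def Spec_expensive_pair (keybord_prices : List Int) (usb_prices : List Int) (budget_amount : Int) (out : Option (List Int)) : Prop := out = expensive_pair_alt keybord_prices usb_prices budget_amount
instance (keybord_prices : List Int) (usb_prices : List Int) (budget_amount : Int) (out : Option (List Int)) : Decidable (Spec_expensive_pair keybord_prices usb_prices budget_amount out) := by unfold Spec_expensive_pair; infer_instance

-- ===== CLAIM (what is proved, stated in full; the proofs are below) =====
def Claim_equal_expensive_pair : Prop := ∀ (keybord_prices : List Int) (usb_prices : List Int) (budget_amount : Int), Dom_expensive_pair keybord_prices usb_prices budget_amount → Spec_expensive_pair keybord_prices usb_prices budget_amount (expensive_pair keybord_prices usb_prices budget_amount)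

-- ===== LEMMAS AND PROOFS =====

-- the inner loop is find?-then-wrap
theorem epInner_eq_find (b k : Int) (us : List Int) :
    epInner b k us = (us.find? (fun u => decide (b ≥ k + u))).map (fun u => [k, u]) := by
  induction us with
  | nil => rfl
  | cons u rest ih =>
    simp only [epInner, List.find?]
    by_cases h : b ≥ k + u
    · simp [h]
    · simp only [ge_iff_le] at h
      simp [h, ih]

-- the outer loop is find?-then-inner
theorem epOuter_eq_find (b : Int) (us ks : List Int) :
    epOuter b us ks =
      match ks.find? (fun k => (epInner b k us).isSome) with
      | some k => epInner b k us
      | none => none := by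
  induction ks with
  | nil => rfl
  | cons k rest ih =>
    simp only [epOuter, List.find?]
    cases h : epInner b k us with
    | some r => simp [h]
    | none => simp [ih]

-- on a descending list, a found element dominates every satisfying element
theorem find_desc_max {p : Int → Bool} {ds : List Int} {m : Int}
    (hd : ds.Pairwise (fun a b => b ≤ a)) (hm : ds.find? p = some m) :
    ∀ y ∈ ds, p y = true → y ≤ m := by
  induction ds with
  | nil => simp at hm
  | cons a rest ih =>
    rw [List.pairwise_cons] at hd
    rw [List.find?] at hm
    by_cases ha : p a = true
    · rw [ha] at hm; simp at hm; subst hm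
      intro y hy _
      rcases List.mem_cons.mp hy with hy' | hy'
      · simp [hy']
      · exact hd.1 y hy'
    · rw [Bool.not_eq_true] at ha; rw [ha] at hm; simp at hm
      intro y hy hp
      rcases List.mem_cons.mp hy with hy' | hy'
      · subst hy'; rw [ha] at hp; exact absurd hp (by simp)
      · exact ih hd.2 hm y hy' hp

-- bestKbLoop: characterisation of a 'some' result
theorem bkl_some {b u : Int} {kp : List Int} {acc : Option Int} {m : Int}
    (h : bestKbLoop b u kp acc = some m) :
    ((m ∈ kp ∧ m + u ≤ b) ∨ acc = some m) ∧
      (∀ a, acc = some a → a ≤ m) ∧ (∀ k ∈ kp, k + u ≤ b → k ≤ m) := by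
  induction kp generalizing acc with
  | nil =>
    simp [bestKbLoop] at h
    refine ⟨Or.inr h, ?_, by simp⟩
    intro a ha
    rw [h] at ha
    simp at ha
    omega
  | cons k rest ih =>
    rw [bestKbLoop] at h
    by_cases hc : (decide (k + u ≤ b) && noneOrLt acc k) = true
    · rw [if_pos hc] at h
      obtain ⟨h1, h2, h3⟩ := ih h
      rw [Bool.and_eq_true, decide_eq_true_eq] at hc
      refine ⟨?_, ?_, ?_⟩
      · rcases h1 with ⟨hm, hb⟩ | he
        · exact Or.inl ⟨List.mem_cons_of_mem _ hm, hb⟩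
        · simp at he; subst he; exact Or.inl ⟨List.mem_cons_self, hc.1⟩
      · intro a ha
        have hk := h2 k rfl
        subst ha
        have : a < k := by
          have h5 := hc.2
          simp [noneOrLt] at h5
          exact h5
        omega
      · intro k' hk' hb'
        rcases List.mem_cons.mp hk' with he | he
        · rw [he]; exact h2 k rfl
        · exact h3 k' he hb'
    · rw [if_neg hc] at h
      obtain ⟨h1, h2, h3⟩ := ih h
      rw [Bool.and_eq_true, decide_eq_true_eq] at hc
      refine ⟨?_, h2, ?_⟩
      · rcases h1 with ⟨hm, hb⟩ | he
        · exact Or.inl ⟨List.mem_cons_of_mem _ hm, hb⟩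
        · exact Or.inr he
      · intro k' hk' hb'
        rcases List.mem_cons.mp hk' with he | he
        · -- k fits but was not taken: acc = some a with ¬ a < k, so k ≤ a ≤ m
          rw [he] at hb' ⊢
          cases hacc : acc with
          | none =>
            subst hacc
            exact absurd ⟨hb', rfl⟩ hc
          | some a =>
            subst hacc
            have hak : ¬ a < k := by
              intro hlt
              exact hc ⟨hb', by simp [noneOrLt, hlt]⟩
            have := h2 a rfl
            omega
        · exact h3 k' he hb'

-- bestKbLoop: a 'none' result means nothing fitted
theorem bkl_none {b u : Int} {kp : List Int} {acc : Option Int}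
    (h : bestKbLoop b u kp acc = none) : acc = none ∧ ∀ k ∈ kp, ¬ (k + u ≤ b) := by
  induction kp generalizing acc with
  | nil => simp [bestKbLoop] at h; simp [h]
  | cons k rest ih =>
    rw [bestKbLoop] at h
    obtain ⟨h1, h2⟩ := ih h
    by_cases hc : (decide (k + u ≤ b) && noneOrLt acc k) = true
    · rw [if_pos hc] at h1; simp at h1
    · rw [if_neg hc] at h1
      rw [Bool.and_eq_true, decide_eq_true_eq] at hc
      refine ⟨h1, ?_⟩
      intro k' hk'
      rcases List.mem_cons.mp hk' with he | he
      · rw [he]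
        intro hb'
        subst h1
        exact hc ⟨hb', rfl⟩
      · exact h2 k' he

-- ===== VERDICT (by name: the statement is the Claim_ definition above) =====
theorem expensive_pair_spec : Claim_equal_expensive_pair := by
  intro kp up b _
  unfold Spec_expensive_pair expensive_pair expensive_pair_alt
  have hmemu : ∀ u : Int, u ∈ PySem.List.sorted up (fun x => x) true ↔ u ∈ up :=
    fun u => PySem.List.mem_sorted up (fun x => x) true u
  have hmemk : ∀ k : Int, k ∈ PySem.List.sorted kp (fun x => x) true ↔ k ∈ kp :=
    fun k => PySem.List.mem_sorted kp (fun x => x) true k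
  have hdescu : (PySem.List.sorted up (fun x => x) true).Pairwise (fun a c => c ≤ a) := by
    simpa using PySem.List.sorted_pairwise_rev (xs := up) (key := fun x => x)
  have hdesck : (PySem.List.sorted kp (fun x => x) true).Pairwise (fun a c => c ≤ a) := by
    simpa using PySem.List.sorted_pairwise_rev (xs := kp) (key := fun x => x)
  cases hu : PySem.List.min? up (fun x => x) with
  | none =>
    have hup : up = [] := by rw [PySem.List.min?_eq_none_iff] at hu; exact hu
    subst hup
    have hnil : PySem.List.sorted ([] : List Int) (fun x => x) true = [] := by
      rw [PySem.List.sorted_eq_nil_iff]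
    have hfe : (PySem.List.sorted kp (fun x => x) true).find?
        (fun k => (epInner b k (PySem.List.sorted ([] : List Int) (fun x => x) true)).isSome) = none := by
      rw [List.find?_eq_none]
      intro k _
      simp [hnil, epInner]
    rw [epOuter_eq_find]
    simp [hfe]
  | some umin =>
    have humem : umin ∈ up := PySem.List.min?_mem hu
    have hmin : ∀ y ∈ up, umin ≤ y := by
      have := PySem.List.min?_isMin hu
      simpa using this
    cases hb : bestKbLoop b umin kp none with
    | none =>
      obtain ⟨-, hnone⟩ := bkl_none hb
      have hfe : (PySem.List.sorted kp (fun x => x) true).find?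
          (fun k => (epInner b k (PySem.List.sorted up (fun x => x) true)).isSome) = none := by
        rw [List.find?_eq_none]
        intro k hk
        rw [epInner_eq_find]
        simp only [Option.isSome_map, Bool.not_eq_true, Option.isSome_eq_false_iff,
          Option.isNone_iff_eq_none, List.find?_eq_none, decide_eq_true_eq]
        intro u hu'
        have h1 := hmin u ((hmemu u).mp hu')
        have h2 := hnone k ((hmemk k).mp hk)
        omega
      rw [epOuter_eq_find]
      simp [hfe, hb]
    | some bk =>
      obtain ⟨h1, -, h3⟩ := bkl_some hb
      have hbk : bk ∈ kp ∧ bk + umin ≤ b := by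
        rcases h1 with h | h
        · exact h
        · simp at h
      have hpbk : (epInner b bk (PySem.List.sorted up (fun x => x) true)).isSome = true := by
        rw [epInner_eq_find]
        simp only [Option.isSome_map, List.find?_isSome]
        exact ⟨umin, (hmemu umin).mpr humem, by simp; omega⟩
      cases hf : (PySem.List.sorted kp (fun x => x) true).find?
          (fun k => (epInner b k (PySem.List.sorted up (fun x => x) true)).isSome) with
      | none =>
        exfalso
        rw [List.find?_eq_none] at hf
        exact hf bk ((hmemk bk).mpr hbk.1) hpbk
      | some k0 =>
        have hk0mem : k0 ∈ kp := (hmemk k0).mp (List.mem_of_find?_eq_some hf)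
        have hk0p : (epInner b k0 (PySem.List.sorted up (fun x => x) true)).isSome = true := by
          have := List.find?_some hf
          simpa using this
        have hex : ∃ u ∈ up, b ≥ k0 + u := by
          rw [epInner_eq_find] at hk0p
          simp only [Option.isSome_map, List.find?_isSome, decide_eq_true_eq] at hk0p
          obtain ⟨u, hu1, hu2⟩ := hk0p
          exact ⟨u, (hmemu u).mp hu1, hu2⟩
        have hk0fit : k0 + umin ≤ b := by
          obtain ⟨u, hu1, hu2⟩ := hex
          have := hmin u hu1
          omega
        have hble : bk ≤ k0 := find_desc_max hdesck hf bk ((hmemk bk).mpr hbk.1) hpbk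
        have hkeq : k0 = bk := le_antisymm (h3 k0 hk0mem hk0fit) hble
        cases hfu : (PySem.List.sorted up (fun x => x) true).find? (fun u => decide (b ≥ k0 + u)) with
        | none =>
          exfalso
          rw [List.find?_eq_none] at hfu
          exact hfu umin ((hmemu umin).mpr humem) (by simp; omega)
        | some u0 =>
          have hu0mem : u0 ∈ up := (hmemu u0).mp (List.mem_of_find?_eq_some hfu)
          have hu0fit : b ≥ k0 + u0 := by
            have := List.find?_some hfu
            simpa using this
          cases hmx : PySem.List.max? (up.filter (fun u => decide (u ≤ b - bk))) (fun x => x) with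
          | none =>
            exfalso
            rw [PySem.List.max?_eq_none_iff] at hmx
            have hmf : umin ∈ up.filter (fun u => decide (u ≤ b - bk)) := by
              rw [List.mem_filter]
              exact ⟨humem, by simp; omega⟩
            rw [hmx] at hmf
            simp at hmf
          | some bu =>
            have hbumem := PySem.List.max?_mem hmx
            rw [List.mem_filter] at hbumem
            have hbu2 : bu ≤ b - bk := by
              have := hbumem.2
              simpa using this
            have hmax : ∀ y ∈ up.filter (fun u => decide (u ≤ b - bk)), y ≤ bu := by
              have := PySem.List.max?_isMax hmx
              simpa using this
            have hule : u0 ≤ bu := by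
              apply hmax
              rw [List.mem_filter]
              exact ⟨hu0mem, by simp; omega⟩
            have hueq : u0 = bu := le_antisymm hule
              (find_desc_max hdescu hfu bu ((hmemu bu).mpr hbumem.1) (by simp; omega))
            rw [epOuter_eq_find, hf]
            show epInner b k0 (PySem.List.sorted up (fun x => x) true) = _
            rw [epInner_eq_find, hfu]
            simp [hb, hmx, hkeq, hueq]
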